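-- pv_equiv track=rewrite | github.com/AleVlaKon/algorytm | 4/4.1.19.py | drop_one_and_five
-- ===== SOURCE A (Python) =====
-- from math import log10, floor
--
-- def drop_one_and_five(n):
--     new_n = 0
--     if n:
--         len_n = floor(log10(n)) + 1
--         for power in range(len_n, 0, -1):
--             ten_in_power = 10 ** (power - 1)
--             left_digit = n // ten_in_power
--             if left_digit not in (1, 5):
--                 new_n += left_digit * ten_in_power
--             else:
--                 new_n //= 10
--             n = n % ten_in_power
--     return new_n
-- ===== SOURCE B (Python) =====
-- def drop_one_and_five(n):
--     # least-significant-first single pass: no log10, no MSB reconstruction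
--     m, acc, mult = abs(n), 0, 1
--     while m:
--         m, d = divmod(m, 10)
--         if d != 1 and d != 5:
--             acc += d * mult
--             mult *= 10
--     return -acc if n < 0 else acc
-- ===== Notes on version B (the rewrite author's own statement) =====
-- stated objective: simpler
-- what changed: Replaces the log10-based MSB-first reconstruction (with its //=10 compaction on dropped digits) by a least-significant-digit-first divmod loop that accumulates kept digits with a running place multiplier.
-- crash fix: On negative n A raises ValueError (math domain error from log10 of a negative number) while B returns the digit-filtered value with the sign preserved. — e.g. on drop_one_and_five(-152): A raises ValueError, B returns -2
import Mathlib
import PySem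

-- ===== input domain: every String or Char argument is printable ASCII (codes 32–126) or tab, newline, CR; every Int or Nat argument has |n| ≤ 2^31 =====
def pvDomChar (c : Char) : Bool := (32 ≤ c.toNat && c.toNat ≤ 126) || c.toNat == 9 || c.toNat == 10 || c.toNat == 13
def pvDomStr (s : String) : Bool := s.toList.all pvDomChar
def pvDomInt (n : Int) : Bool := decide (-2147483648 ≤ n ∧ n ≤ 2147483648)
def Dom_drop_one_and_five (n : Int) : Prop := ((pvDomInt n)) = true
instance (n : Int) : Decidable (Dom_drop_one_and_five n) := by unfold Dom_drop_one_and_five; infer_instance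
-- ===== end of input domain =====

-- B rewrites A's log10-based MSB-first reconstruction as an LSB-first divmod loop (same values; on
-- negatives A raises via log10 while B returns — see Raises_ below).

-- ===== PORT A =====
-- helper porting `floor(log10(n)) + 1`: for 1 ≤ n ≤ 2^31 this float expression is exactly the
-- decimal digit count (float error is far below 1 ulp of the floor boundary in this range);
-- math.log10 raises on n < 0, which Pre_ excludes, and the n = 0 branch never reaches it.
def numDigits (m : Nat) : Nat :=
  if m < 10 then 1 else numDigits (m / 10) + 1
decreasing_by exact Nat.div_lt_self (by omega) (by norm_num)

def drop_one_and_five (n : Int) : Int :=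
  if n ≠ 0 then
    let len : Int := (numDigits n.natAbs : Nat)
    ((PySem.List.pyRange len 0 (-1)).foldl (fun (st : Int × Int) power =>
      let ten : Int := 10 ^ (power - 1).toNat   -- power ≥ 1 inside this range, so toNat is exact
      let left := PySem.Int.floordiv st.2 ten
      let acc := if left ≠ 1 ∧ left ≠ 5 then st.1 + left * ten
                 else PySem.Int.floordiv st.1 10
      (acc, PySem.Int.mod st.2 ten)) ((0 : Int), n)).1
  else 0

-- ===== PORT B =====
-- Source B's while-loop; after `abs(n)` everything is a nonnegative int, so divmod is Nat div/mod (exact)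
def altLoop (m acc mult : Nat) : Nat :=
  if m = 0 then acc
  else
    let d := m % 10
    if d ≠ 1 ∧ d ≠ 5 then altLoop (m / 10) (acc + d * mult) (mult * 10)
    else altLoop (m / 10) acc mult
decreasing_by all_goals exact Nat.div_lt_self (by omega) (by norm_num)

def drop_one_and_five_alt (n : Int) : Int :=
  let r : Int := (altLoop n.natAbs 0 1 : Nat)
  if n < 0 then -r else r

-- ===== PRECONDITION & SPEC =====
-- Pre_ excludes exactly the negative inputs, on which A raises ValueError (log10 of a negative)
def Pre_drop_one_and_five (n : Int) : Prop := 0 ≤ n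
instance (n : Int) : Decidable (Pre_drop_one_and_five n) := by unfold Pre_drop_one_and_five; infer_instance
def pvWitness_drop_one_and_five : Int := (152)

-- On negative n A raises ValueError (math domain error from log10); B returns the sign-preserving filtered value.
def Raises_drop_one_and_five (n : Int) : Prop := n < 0
instance (n : Int) : Decidable (Raises_drop_one_and_five n) := by unfold Raises_drop_one_and_five; infer_instance
def pvRaiseWitness_drop_one_and_five : Int := (-152)
def pvRaiseWitnessOut_drop_one_and_five : Int := -2

def Spec_drop_one_and_five (n : Int) (out : Int) : Prop := out = drop_one_and_five_alt n
instance (n : Int) (out : Int) : Decidable (Spec_drop_one_and_five n out) := by unfold Spec_drop_one_and_five; infer_instance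

-- ===== CLAIM (what is proved, stated in full; the proofs are below) =====
def Claim_equal_drop_one_and_five : Prop := ∀ (n : Int), Dom_drop_one_and_five n → Pre_drop_one_and_five n → Spec_drop_one_and_five n (drop_one_and_five n)
def Claim_raises_drop_one_and_five : Prop := (∀ (n : Int), Dom_drop_one_and_five n → Raises_drop_one_and_five n → ¬ Pre_drop_one_and_five n) ∧ (Dom_drop_one_and_five (pvRaiseWitness_drop_one_and_five) ∧ Raises_drop_one_and_five (pvRaiseWitness_drop_one_and_five) ∧ drop_one_and_five_alt (pvRaiseWitness_drop_one_and_five) = pvRaiseWitnessOut_drop_one_and_five)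

-- ===== LEMMAS AND PROOFS =====

-- the filtered number, LSB-first
def g (m : Nat) : Nat :=
  if m = 0 then 0
  else if m % 10 = 1 ∨ m % 10 = 5 then g (m / 10)
  else g (m / 10) * 10 + m % 10
decreasing_by all_goals exact Nat.div_lt_self (by omega) (by norm_num)

-- number of dropped digits among the k low decimal digits of r
def dropC : Nat → Nat → Nat
  | 0, _ => 0
  | k+1, r => dropC k (r / 10) + (if r % 10 = 1 ∨ r % 10 = 5 then 1 else 0)

theorem g_keep (r : Nat) (h : ¬ (r % 10 = 1 ∨ r % 10 = 5)) : g r = g (r / 10) * 10 + r % 10 := by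
  by_cases h0 : r = 0
  · subst h0; simp [g]
  · rw [g]; simp [h0, h]

theorem g_drop (r : Nat) (h : r % 10 = 1 ∨ r % 10 = 5) : g r = g (r / 10) := by
  have h0 : r ≠ 0 := by rcases h with h | h <;> omega
  rw [g]; simp [h0, h]

theorem altLoop_eq (m : Nat) : ∀ acc mult, altLoop m acc mult = acc + mult * g m := by
  induction m using Nat.strong_induction_on with
  | _ m ih =>
    intro acc mult
    by_cases h0 : m = 0
    · subst h0; rw [altLoop]; simp [g]
    · rw [altLoop]
      simp only [h0, if_false]
      have hlt : m / 10 < m := Nat.div_lt_self (by omega) (by norm_num)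
      by_cases hk : m % 10 ≠ 1 ∧ m % 10 ≠ 5
      · rw [if_pos hk, ih _ hlt, g_keep m (by omega)]; ring
      · rw [if_neg hk, ih _ hlt, g_drop m (by omega)]

theorem dropC_le (k : Nat) : ∀ r, dropC k r ≤ k := by
  induction k with
  | zero => intro r; simp [dropC]
  | succ k ih => intro r; have := ih (r / 10); simp only [dropC]; split <;> omega

-- MSB split of dropC
theorem dropC_msb (k : Nat) : ∀ r, r < 10 ^ (k+1) →
    dropC (k+1) r = dropC k (r % 10 ^ k) + (if r / 10 ^ k = 1 ∨ r / 10 ^ k = 5 then 1 else 0) := by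
  induction k with
  | zero =>
    intro r hr
    norm_num at hr
    simp [dropC, Nat.mod_eq_of_lt hr]
  | succ k ih =>
    intro r hr
    have h1 : r / 10 < 10 ^ (k+1) := by
      rw [Nat.div_lt_iff_lt_mul (by norm_num)]
      calc r < 10 ^ (k+2) := hr
        _ = 10 ^ (k+1) * 10 := by ring
    have e1 : r / 10 / 10 ^ k = r / 10 ^ (k+1) := by
      rw [Nat.div_div_eq_div_mul, pow_succ]; ring_nf
    have e2 : r / 10 % 10 ^ k = r % 10 ^ (k+1) / 10 := by
      rw [pow_succ, mul_comm, Nat.mod_mul_right_div_self]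
    have e3 : r % 10 ^ (k+1) % 10 = r % 10 := by
      exact Nat.mod_mod_of_dvd r (dvd_pow_self 10 (by omega))
    show dropC (k+1) (r / 10) + _ = dropC (k+1) (r % 10 ^ (k+1)) + _
    rw [ih (r / 10) h1, e1]
    conv_rhs => rw [show dropC (k+1) (r % 10^(k+1)) = dropC k (r % 10^(k+1) / 10) + (if r % 10^(k+1) % 10 = 1 ∨ r % 10^(k+1) % 10 = 5 then 1 else 0) from rfl]
    rw [e2, e3]
    ring

-- MSB split of g: the top digit L of L*10^k + r contributes L shifted past r's kept digits
theorem g_msb (k : Nat) : ∀ L r, L < 10 → r < 10 ^ k →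
    g (L * 10 ^ k + r) = if L = 1 ∨ L = 5 then g r else L * 10 ^ (k - dropC k r) + g r := by
  induction k with
  | zero =>
    intro L r hL hr
    have hr0 : r = 0 := by simpa [Nat.lt_one_iff] using hr
    subst hr0
    simp only [pow_zero, mul_one, Nat.add_zero, dropC]
    by_cases h : L = 1 ∨ L = 5
    · rw [if_pos h, g_drop L (by rcases h with h|h <;> simp [h]), Nat.div_eq_of_lt hL]
    · rw [if_neg h]
      by_cases h0 : L = 0
      · simp [h0, g]
      · rw [g_keep L (by rw [Nat.mod_eq_of_lt hL]; exact h), Nat.div_eq_of_lt hL,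
            Nat.mod_eq_of_lt hL]
        simp [g]
  | succ k ih =>
    intro L r hL hr
    have hsplit : L * 10 ^ (k+1) + r = r + (L * 10 ^ k) * 10 := by ring
    have hx10 : (L * 10 ^ (k+1) + r) % 10 = r % 10 := by
      rw [hsplit, Nat.add_mul_mod_self_right]
    have hxd : (L * 10 ^ (k+1) + r) / 10 = L * 10 ^ k + r / 10 := by
      rw [hsplit, Nat.add_mul_div_right _ _ (by norm_num : (0:Nat) < 10)]
      omega
    have hr10 : r / 10 < 10 ^ k := by
      rw [Nat.div_lt_iff_lt_mul (by norm_num)]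
      calc r < 10 ^ (k+1) := hr
        _ = 10 ^ k * 10 := by rw [pow_succ]
    have hd := dropC_le k (r / 10)
    by_cases hk : r % 10 = 1 ∨ r % 10 = 5
    · -- low digit of r dropped
      have hdrop : dropC (k+1) r = dropC k (r / 10) + 1 := by simp [dropC, hk]
      rw [g_drop _ (by rw [hx10]; exact hk), hxd, ih L (r / 10) hL hr10,
          g_drop r hk, hdrop]
      by_cases h : L = 1 ∨ L = 5
      · simp [h]
      · rw [if_neg h, if_neg h]
        have he : k + 1 - (dropC k (r / 10) + 1) = k - dropC k (r / 10) := by omega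
        rw [he]
    · -- low digit of r kept
      have hdrop : dropC (k+1) r = dropC k (r / 10) := by simp [dropC, hk]
      rw [g_keep _ (by rw [hx10]; exact hk), hxd, ih L (r / 10) hL hr10, hx10,
          g_keep r hk, hdrop]
      by_cases h : L = 1 ∨ L = 5
      · simp [h]
      · rw [if_neg h, if_neg h]
        have : k + 1 - dropC k (r / 10) = (k - dropC k (r / 10)) + 1 := by omega
        rw [this, pow_succ]
        ring

theorem numDigits_bound (m : Nat) : m < 10 ^ numDigits m := by
  induction m using Nat.strong_induction_on with
  | _ m ih =>
    rw [numDigits]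
    by_cases h : m < 10
    · simpa [h]
    · rw [if_neg h]
      have hlt : m / 10 < m := Nat.div_lt_self (by omega) (by norm_num)
      have := ih _ hlt
      rw [pow_succ]
      omega

-- A's loop, processed from power k down to 1, on state (acc, n)
theorem foldA_eq (k : Nat) : ∀ (acc n : Int), 0 ≤ acc → 0 ≤ n → n < 10 ^ k →
    ((10:Int) ^ k ∣ acc * 10) →
    ((PySem.List.pyRange (k : Int) 0 (-1)).foldl (fun (st : Int × Int) power =>
      let ten : Int := 10 ^ (power - 1).toNat
      let left := PySem.Int.floordiv st.2 ten
      let acc := if left ≠ 1 ∧ left ≠ 5 then st.1 + left * ten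
                 else PySem.Int.floordiv st.1 10
      (acc, PySem.Int.mod st.2 ten)) (acc, n)).1
      = PySem.Int.floordiv acc (10 ^ dropC k n.toNat) + (g n.toNat : Int) := by
  induction k with
  | zero =>
    intro acc n hacc hn hlt _
    have hn0 : n = 0 := by norm_num at hlt; omega
    rw [PySem.List.pyRange_neg_one_eq_nil (by norm_num)]
    subst hn0
    simp [dropC, g, PySem.Int.floordiv_eq_ediv_of_pos (by norm_num : (0:Int) < 1)]
  | succ k ih =>
    intro acc n hacc hn hlt hdvd
    have hten : (0:Int) < 10 ^ k := by positivity
    have hNeq : ((n.toNat : Int)) = n := Int.toNat_of_nonneg hn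
    have hNlt : n.toNat < 10 ^ (k+1) := by
      have : ((n.toNat : Int)) < ((10 ^ (k+1) : Nat) : Int) := by push_cast; rw [hNeq]; exact_mod_cast hlt
      exact_mod_cast this
    have hcons : PySem.List.pyRange ((k+1 : Nat) : Int) 0 (-1)
        = ((k+1 : Nat) : Int) :: PySem.List.pyRange (((k+1 : Nat) : Int) - 1) 0 (-1) :=
      PySem.List.pyRange_neg_one_cons (by exact_mod_cast Nat.succ_pos k)
    have hsub : (((k+1 : Nat) : Int) - 1) = (k : Int) := by push_cast; ring
    have htn : ((((k+1 : Nat) : Int) - 1).toNat) = k := by rw [hsub]; exact Int.toNat_natCast k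
    have hcast10 : ((10:Int) ^ k) = (((10 ^ k : Nat)) : Int) := by push_cast; ring
    set L := n.toNat / 10 ^ k with hLdef
    set r := n.toNat % 10 ^ k with hrdef
    have hNsplit : L * 10 ^ k + r = n.toNat := by
      rw [hLdef, hrdef, mul_comm]
      exact Nat.div_add_mod _ _
    have hL : L < 10 := by
      rw [hLdef, Nat.div_lt_iff_lt_mul (by positivity)]
      calc n.toNat < 10 ^ (k+1) := hNlt
        _ = 10 * 10 ^ k := by ring
    have hr : r < 10 ^ k := Nat.mod_lt _ (by positivity)
    have hleft : PySem.Int.floordiv n ((10:Int) ^ k) = ((L : Nat) : Int) := by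
      rw [← hNeq, hcast10]; exact PySem.Int.floordiv_natCast _ _
    have hmod : PySem.Int.mod n ((10:Int) ^ k) = ((r : Nat) : Int) := by
      rw [← hNeq, hcast10]; exact PySem.Int.mod_natCast _ _
    have hdvd' : (10:Int) ^ k ∣ acc := by
      rcases hdvd with ⟨t, ht⟩
      refine ⟨t, ?_⟩
      have h : acc * 10 = 10 ^ k * t * 10 := by rw [ht]; ring
      exact mul_right_cancel₀ (by norm_num : (10:Int) ≠ 0) h
    rw [hcons, List.foldl_cons]
    simp only [htn, hleft, hmod]
    by_cases hkeep : ((L : Nat) : Int) ≠ 1 ∧ ((L : Nat) : Int) ≠ 5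
    · -- top digit kept
      have hLnat : ¬ (L = 1 ∨ L = 5) := by
        rcases hkeep with ⟨h1, h5⟩
        intro h; rcases h with h | h <;> simp [h] at h1 h5
      rw [if_pos hkeep, hsub]
      have hd := dropC_le k r
      have ihres := ih (acc + ((L : Nat) : Int) * 10 ^ k) ((r : Nat) : Int)
        (by positivity) (by positivity) (by exact_mod_cast hr)
        (by
          have h1 : (10:Int) ^ k ∣ acc + ((L : Nat) : Int) * 10 ^ k :=
            dvd_add hdvd' ⟨(L : Int), by ring⟩
          exact Dvd.dvd.mul_right h1 10)
      rw [ihres, Int.toNat_natCast]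
      have hmsbd : dropC (k+1) n.toNat = dropC k r := by
        rw [dropC_msb k n.toNat hNlt, ← hrdef, ← hLdef, if_neg hLnat]
        omega
      have hmsbg : g n.toNat = L * 10 ^ (k - dropC k r) + g r := by
        rw [← hNsplit, g_msb k L r hL hr, if_neg hLnat]
      rw [hmsbd, hmsbg]
      -- floordiv (acc + L*10^k) (10^d) = floordiv acc (10^d) + L*10^(k-d)
      set d := dropC k r with hddef
      have hdpos : (0:Int) < 10 ^ d := by positivity
      rw [PySem.Int.floordiv_eq_ediv_of_pos hdpos, PySem.Int.floordiv_eq_ediv_of_pos hdpos]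
      have hsplitpow : ((L : Nat) : Int) * 10 ^ k = (((L : Nat) : Int) * 10 ^ (k - d)) * 10 ^ d := by
        rw [mul_assoc, ← pow_add]
        congr 2
        omega
      have hdvdL : (10:Int) ^ d ∣ ((L : Nat) : Int) * 10 ^ k :=
        ⟨((L : Nat) : Int) * 10 ^ (k - d), by rw [hsplitpow]; ring⟩
      rw [Int.add_ediv_of_dvd_right hdvdL]
      have : ((L : Nat) : Int) * 10 ^ k / 10 ^ d = ((L : Nat) : Int) * 10 ^ (k - d) := by
        rw [hsplitpow]
        exact Int.mul_ediv_cancel _ (by positivity)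
      rw [this]
      push_cast
      ring
    · -- top digit dropped
      have hLnat : L = 1 ∨ L = 5 := by
        by_contra hc
        push_neg at hc
        exact hkeep ⟨by exact_mod_cast hc.1, by exact_mod_cast hc.2⟩
      rw [if_neg hkeep, hsub]
      have hacc1 : (0:Int) ≤ PySem.Int.floordiv acc 10 := by
        rw [PySem.Int.floordiv_eq_ediv_of_pos (by norm_num : (0:Int) < 10)]
        exact Int.ediv_nonneg hacc (by norm_num)
      have hdvd1 : (10:Int) ^ k ∣ PySem.Int.floordiv acc 10 * 10 := by
        rw [PySem.Int.floordiv_eq_ediv_of_pos (by norm_num : (0:Int) < 10)]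
        rcases k with _ | k
        · simp
        · rcases hdvd' with ⟨t, ht⟩
          refine ⟨t, ?_⟩
          rw [ht, show (10:Int) ^ (k+1) * t = 10 ^ k * t * 10 from by ring,
              Int.mul_ediv_cancel _ (by norm_num : (10:Int) ≠ 0)]
      have ihres := ih (PySem.Int.floordiv acc 10) ((r : Nat) : Int)
        hacc1 (by positivity) (by exact_mod_cast hr) hdvd1
      rw [ihres, Int.toNat_natCast]
      have hmsbd : dropC (k+1) n.toNat = dropC k r + 1 := by
        rw [dropC_msb k n.toNat hNlt, ← hrdef, ← hLdef, if_pos hLnat]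
      have hmsbg : g n.toNat = g r := by
        rw [← hNsplit, g_msb k L r hL hr, if_pos hLnat]
      rw [hmsbd, hmsbg]
      set d := dropC k r with hddef
      have hdpos : (0:Int) < 10 ^ d := by positivity
      have hdpos1 : (0:Int) < 10 ^ (d+1) := by positivity
      rw [PySem.Int.floordiv_eq_ediv_of_pos hdpos,
          PySem.Int.floordiv_eq_ediv_of_pos (by norm_num : (0:Int) < 10),
          PySem.Int.floordiv_eq_ediv_of_pos hdpos1]
      rw [Int.ediv_ediv_of_nonneg (by norm_num : (0:Int) ≤ 10)]
      congr 2
      rw [pow_succ]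
      ring

theorem g_zero : g 0 = 0 := by rw [g]; simp

theorem drop_one_and_five_spec : Claim_equal_drop_one_and_five := by
  intro n _ hp
  unfold Pre_drop_one_and_five at hp
  unfold Spec_drop_one_and_five drop_one_and_five_alt
  have hneg : ¬ n < 0 := by omega
  rw [if_neg hneg, altLoop_eq]
  by_cases h0 : n = 0
  · subst h0
    simp [drop_one_and_five, g_zero]
  · unfold drop_one_and_five
    rw [if_pos h0]
    have habs : n.toNat = n.natAbs := by omega
    have hbound : n < 10 ^ numDigits n.natAbs := by
      have h1 : n.toNat < 10 ^ numDigits n.natAbs := by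
        rw [habs]; exact numDigits_bound _
      have h2 : ((n.toNat : Int)) < (((10 ^ numDigits n.natAbs : Nat)) : Int) := by exact_mod_cast h1
      rw [Int.toNat_of_nonneg hp] at h2
      calc n < (((10 ^ numDigits n.natAbs : Nat)) : Int) := h2
        _ = 10 ^ numDigits n.natAbs := by push_cast; ring
    simp only [foldA_eq (numDigits n.natAbs) 0 n le_rfl hp hbound (by simp)]
    rw [PySem.Int.floordiv_eq_ediv_of_pos (by positivity), Int.zero_ediv, habs]
    push_cast
    ring

theorem g_one : g 1 = 0 := by rw [g]; norm_num [g_zero]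

theorem g_fifteen : g 15 = 0 := by rw [g]; norm_num [g_one]

theorem g_one_five_two : g 152 = 2 := by rw [g]; norm_num [g_fifteen]

theorem alt_neg152 : drop_one_and_five_alt (-152) = -2 := by
  unfold drop_one_and_five_alt
  rw [if_pos (by norm_num : (-152 : Int) < 0), altLoop_eq]
  norm_num [g_one_five_two]

def drop_one_and_five_raises : Claim_raises_drop_one_and_five := by
  unfold Claim_raises_drop_one_and_five
  refine ⟨fun n _ h hp => absurd hp (by unfold Pre_drop_one_and_five Raises_drop_one_and_five at *; omega),
    by decide, by decide, alt_neg152⟩
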